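-- pv_equiv track=rewrite | github.com/dreamcrash/adventofcode | day13.py | found_smudge
-- ===== SOURCE A (Python) =====
-- def found_smudge(mirror: [str], row_pos: int):
--     total_differences = 0
--     positions = 0
--     while True:
--         if row_pos - positions < 0 or row_pos + positions + 1 >= len(mirror):
--             return positions > 0 and total_differences == 1
--         row_below = mirror[row_pos - positions]
--         row_above = mirror[row_pos + positions + 1]
--         total_differences += sum(1 for c1, c2 in zip(row_below, row_above) if c1 != c2)
--         if total_differences > 1:
--             return False
--         positions += 1
-- ===== SOURCE B (Python) =====
-- def found_smudge(mirror: [str], row_pos: int):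
--     if row_pos < 0:
--         return False
--     top = mirror[:row_pos + 1][::-1]
--     bottom = mirror[row_pos + 1:]
--     pairs = list(zip(top, bottom))
--     if not pairs:
--         return False
--     diff = sum(c1 != c2 for r1, r2 in pairs for c1, c2 in zip(r1, r2))
--     return diff == 1
-- ===== Notes on version B (the rewrite author's own statement) =====
-- stated objective: idiomatic
-- what changed: Replaces A's while-loop with running position/total counters and early exit by slicing the mirror into its two halves, zipping them (zip stops at the shorter side, matching A's bounds checks), summing all per-character mismatches in one expression and comparing the total to 1.
import Mathlib
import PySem

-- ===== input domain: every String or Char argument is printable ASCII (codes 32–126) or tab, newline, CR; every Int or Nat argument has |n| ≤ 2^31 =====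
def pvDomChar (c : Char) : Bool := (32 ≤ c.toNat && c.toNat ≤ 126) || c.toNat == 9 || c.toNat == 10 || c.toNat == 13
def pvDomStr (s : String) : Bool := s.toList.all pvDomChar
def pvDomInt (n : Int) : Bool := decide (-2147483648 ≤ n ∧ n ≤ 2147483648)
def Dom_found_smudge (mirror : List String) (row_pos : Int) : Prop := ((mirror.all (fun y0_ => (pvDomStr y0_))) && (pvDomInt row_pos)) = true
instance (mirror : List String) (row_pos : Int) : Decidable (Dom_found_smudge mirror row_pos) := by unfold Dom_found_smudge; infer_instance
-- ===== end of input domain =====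

-- B replaces A's while-loop with running counters by slicing the two halves, zipping them and
-- comparing one total mismatch count to 1 (idiomatic decomposition; same asymptotic cost).

-- ===== PORT A =====
-- A's while-loop, made total with a fuel counter (mirror.length + 1 always suffices: the loop
-- performs at most mirror.length iterations before one of its exit conditions fires).
def fsLoop (mirror : List String) (row_pos : Int) : Nat → Int → Int → Bool
  | 0, _, _ => false  -- never reached with the fuel found_smudge supplies
  | fuel + 1, total, positions =>
    if row_pos - positions < 0 ∨ (mirror.length : Int) ≤ row_pos + positions + 1 then
      decide (0 < positions) && decide (total = 1)
    else
      -- both indices are in range here, so getD "" is exact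
      let row_below := (PySem.List.pyGet? mirror (row_pos - positions)).getD ""
      let row_above := (PySem.List.pyGet? mirror (row_pos + positions + 1)).getD ""
      let total' := total + ((row_below.toList.zip row_above.toList).countP (fun c => c.1 ≠ c.2) : Int)
      if 1 < total' then false
      else fsLoop mirror row_pos fuel total' (positions + 1)

def found_smudge (mirror : List String) (row_pos : Int) : Bool :=
  fsLoop mirror row_pos (mirror.length + 1) 0 0

-- ===== PORT B =====
-- per-row mismatch count: sum(c1 != c2 for c1, c2 in zip(r1, r2)) with bools counted as 0/1
def rowDiff (r1 r2 : String) : Int :=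
  ((r1.toList.zip r2.toList).map (fun c => if c.1 ≠ c.2 then (1 : Int) else 0)).sum

def found_smudge_alt (mirror : List String) (row_pos : Int) : Bool :=
  if row_pos < 0 then false
  else
    -- top = mirror[:row_pos+1][::-1]; bottom = mirror[row_pos+1:]
    let top := (PySem.List.slice? (PySem.List.slice mirror none (some (row_pos + 1))) none none (-1)).getD []
    let bottom := PySem.List.slice mirror (some (row_pos + 1)) none
    let pairs := top.zip bottom
    if pairs.isEmpty then false
    else decide ((pairs.map (fun q => rowDiff q.1 q.2)).sum = 1)

-- ===== PRECONDITION & SPEC =====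
def Spec_found_smudge (mirror : List String) (row_pos : Int) (out : Bool) : Prop := out = found_smudge_alt mirror row_pos
instance (mirror : List String) (row_pos : Int) (out : Bool) : Decidable (Spec_found_smudge mirror row_pos out) := by unfold Spec_found_smudge; infer_instance

-- ===== CLAIM (what is proved, stated in full; the proofs are below) =====
def Claim_equal_found_smudge : Prop := ∀ (mirror : List String) (row_pos : Int), Dom_found_smudge mirror row_pos → Spec_found_smudge mirror row_pos (found_smudge mirror row_pos)

-- ===== LEMMAS AND PROOFS =====

-- mismatch count of one pair of rows, as A computes it, cast to Int
def diffA (q : String × String) : Int :=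
  ((q.1.toList.zip q.2.toList).countP (fun c => c.1 ≠ c.2) : Int)

lemma diffA_nonneg (q : String × String) : 0 ≤ diffA q := by
  simp [diffA]

lemma sum_diffA_nonneg (l : List (String × String)) :
    0 ≤ (l.map diffA).sum := by
  apply List.sum_nonneg
  intro x hx
  rcases List.mem_map.mp hx with ⟨q, _, rfl⟩
  exact diffA_nonneg q

lemma rowDiff_eq_diffA (q : String × String) : rowDiff q.1 q.2 = diffA q := by
  simp only [rowDiff, diffA]
  induction q.1.toList.zip q.2.toList with
  | nil => simp
  | cons c l ih =>
    simp [List.countP_cons, ih]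
    split_ifs <;> simp_all <;> push_cast <;> ring

-- the heart of the proof: A's loop equals the zip spec, for 0 ≤ row_pos
lemma fsLoop_eq (mirror : List String) (rp : Int) (hrp : 0 ≤ rp)
    (P : List (String × String))
    (hP : P = ((mirror.take (rp.toNat + 1)).reverse).zip (mirror.drop (rp.toNat + 1))) :
    ∀ (fuel p : Nat) (t : Int), (P.drop p).length < fuel →
    fsLoop mirror rp fuel t (p : Int)
      = (decide (0 < p + (P.drop p).length) &&
         decide (t + ((P.drop p).map diffA).sum = 1)) := by
  have hlen : P.length = min (rp.toNat + 1) (mirror.length - (rp.toNat + 1)) := by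
    subst hP; simp [List.length_zip]
  intro fuel
  induction fuel with
  | zero => intro p t h; omega
  | succ fuel ih =>
    intro p t h
    by_cases hC : rp - (p : Int) < 0 ∨ (mirror.length : Int) ≤ rp + p + 1
    · -- loop exits: the remaining pair list is empty
      have hple : P.length ≤ p := by omega
      have hdrop : P.drop p = [] := List.drop_eq_nil_iff.mpr hple
      rw [fsLoop, if_pos hC, hdrop]
      simp
    · -- loop continues: P[p] is exactly the pair of rows A reads
      push_neg at hC
      have hplt : p < P.length := by omega
      have hp1 : p < rp.toNat + 1 := by omega
      have hp2 : rp.toNat + 1 + p < mirror.length := by omega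
      have htop : ((mirror.take (rp.toNat + 1)).reverse)[p]'(by simp; omega)
          = mirror[rp.toNat - p]'(by omega) := by
        rw [List.getElem_reverse]
        rw [List.getElem_take]
        congr 1
        simp
        omega
      have hbot : (mirror.drop (rp.toNat + 1))[p]'(by simp; omega)
          = mirror[rp.toNat + 1 + p]'(hp2) := by
        rw [List.getElem_drop]
      have hPel : P[p]'hplt = (mirror[rp.toNat - p]'(by omega), mirror[rp.toNat + 1 + p]'hp2) := by
        subst hP
        rw [List.getElem_zip]
        rw [htop, hbot]
      have hdrop : P.drop p = P[p]'hplt :: P.drop (p + 1) :=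
        List.drop_eq_getElem_cons hplt
      have hgetb : (PySem.List.pyGet? mirror (rp - (p : Int))).getD ""
          = mirror[rp.toNat - p]'(by omega) := by
        have : rp - (p : Int) = ((rp.toNat - p : Nat) : Int) := by omega
        rw [this, PySem.List.pyGet?_natCast, List.getElem?_eq_getElem (by omega)]
        rfl
      have hgeta : (PySem.List.pyGet? mirror (rp + (p : Int) + 1)).getD ""
          = mirror[rp.toNat + 1 + p]'hp2 := by
        have : rp + (p : Int) + 1 = ((rp.toNat + 1 + p : Nat) : Int) := by omega
        rw [this, PySem.List.pyGet?_natCast, List.getElem?_eq_getElem hp2]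
        rfl
      rw [fsLoop, if_neg (by push_neg; exact hC)]
      simp only [hgetb, hgeta]
      have hd : ((mirror[rp.toNat - p]'(by omega)).toList.zip
            (mirror[rp.toNat + 1 + p]'hp2).toList).countP (fun c => c.1 ≠ c.2)
          = (diffA (P[p]'hplt)).toNat := by
        rw [hPel]; simp [diffA]
      by_cases hbig : 1 < t + (((mirror[rp.toNat - p]'(by omega)).toList.zip
            (mirror[rp.toNat + 1 + p]'hp2).toList).countP (fun c => c.1 ≠ c.2) : Int)
      · rw [if_pos hbig]
        have hs : 0 ≤ ((P.drop (p + 1)).map diffA).sum := sum_diffA_nonneg _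
        have : t + ((P.drop p).map diffA).sum ≠ 1 := by
          rw [hdrop]
          simp only [List.map_cons, List.sum_cons]
          have hdi : (((mirror[rp.toNat - p]'(by omega)).toList.zip
              (mirror[rp.toNat + 1 + p]'hp2).toList).countP (fun c => c.1 ≠ c.2) : Int)
              = diffA (P[p]'hplt) := by
            rw [hd]
            have := diffA_nonneg (P[p]'hplt); omega
          omega
        rw [decide_eq_false this, Bool.and_false]
      · rw [if_neg hbig]
        have hfuel : (P.drop (p + 1)).length < fuel := by
          have h1 : (P.drop p).length = P.length - p := by simp
          have h2 : (P.drop (p + 1)).length = P.length - (p + 1) := by simp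
          omega
        have hrec := ih (p + 1) (t + (((mirror[rp.toNat - p]'(by omega)).toList.zip
            (mirror[rp.toNat + 1 + p]'hp2).toList).countP (fun c => c.1 ≠ c.2) : Int)) hfuel
        have hcast : ((p : Int) + 1) = (((p + 1 : Nat)) : Int) := by push_cast; ring
        rw [hcast, hrec]
        have hdi : (((mirror[rp.toNat - p]'(by omega)).toList.zip
            (mirror[rp.toNat + 1 + p]'hp2).toList).countP (fun c => c.1 ≠ c.2) : Int)
            = diffA (P[p]'hplt) := by
          rw [hd]
          have := diffA_nonneg (P[p]'hplt); omega
        have hL : (P.drop p).length = (P.drop (p+1)).length + 1 := by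
          rw [hdrop]; simp only [List.length_cons]
        have hS : ((P.drop p).map diffA).sum
            = diffA (P[p]'hplt) + ((P.drop (p + 1)).map diffA).sum := by
          rw [hdrop]; simp only [List.map_cons, List.sum_cons]
        congr 1
        · simp only [decide_eq_decide]
          omega
        · simp only [decide_eq_decide]
          rw [hS, ← hdi]
          omega

-- B's slice expressions reduce to take/drop/reverse
lemma top_eq (mirror : List String) (rp : Int) (hrp : 0 ≤ rp) :
    (PySem.List.slice? (PySem.List.slice mirror none (some (rp + 1))) none none (-1)).getD []
      = (mirror.take (rp.toNat + 1)).reverse := by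
  rw [PySem.List.slice?_none_none_neg_one, Option.getD_some,
    PySem.List.slice_to mirror (by omega : (0:Int) ≤ rp + 1)]
  congr 2
  omega

lemma bottom_eq (mirror : List String) (rp : Int) (hrp : 0 ≤ rp) :
    PySem.List.slice mirror (some (rp + 1)) none = mirror.drop (rp.toNat + 1) := by
  rw [PySem.List.slice_from mirror (by omega : (0:Int) ≤ rp + 1)]
  congr 1
  omega

-- ===== VERDICT (by name: the statement is the Claim_ definition above) =====
theorem found_smudge_spec : Claim_equal_found_smudge := by
  intro mirror rp _
  unfold Spec_found_smudge found_smudge found_smudge_alt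
  by_cases hrp : rp < 0
  · rw [if_pos hrp]
    rw [fsLoop, if_pos (by left; omega)]
    simp
  · push_neg at hrp
    rw [if_neg (by omega)]
    simp only [top_eq mirror rp hrp, bottom_eq mirror rp hrp]
    set P : List (String × String) :=
      ((mirror.take (rp.toNat + 1)).reverse).zip (mirror.drop (rp.toNat + 1)) with hP
    have hlen : P.length ≤ mirror.length := by
      rw [hP]
      simp only [List.length_zip, List.length_reverse, List.length_take, List.length_drop]
      omega
    have hmain := fsLoop_eq mirror rp hrp P hP (mirror.length + 1) 0 0
      (by rw [List.drop_zero]; exact Nat.lt_succ_of_le hlen)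
    simp only [Nat.cast_zero, List.drop_zero, zero_add] at hmain
    rw [hmain]
    by_cases hE : P.isEmpty
    · rw [if_pos hE]
      simp at hE
      simp [hE]
    · rw [if_neg hE]
      have hl : 0 < P.length := by
        simp only [List.isEmpty_iff] at hE
        exact List.length_pos_iff.mpr hE
      have hmap : (P.map (fun q => rowDiff q.1 q.2)).sum = (P.map diffA).sum := by
        congr 1
        apply List.map_congr_left
        intro q _
        exact rowDiff_eq_diffA q
      rw [hmap]
      simp [hl]
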